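-- pv_equiv track=rewrite | github.com/colearbuckle/FileShare | Baseband_Unit_Prototype_3/baseband_unit_generator_v11.py | fire_code
-- ===== SOURCE A (Python) =====
-- def fire_code(bits):
--     # generator polynomial (degree 10)
--     g = [1,0,1,0,0,1,1,0,1,0,1]  # x^10 + x^8 + x^6 + x^5 + x^4 + x^2 + 1
--
--     reg = bits + [0]*10
--
--     for i in range(len(bits)):
--         if reg[i] == 1:
--             for j in range(len(g)):
--                 reg[i+j] ^= g[j]
--
--     remainder = reg[-10:]
--     return bits + remainder
-- ===== SOURCE B (Python) =====
-- def fire_code(bits):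
--     # 10-bit LFSR: taps = non-top coefficients g[1..10] of x^10+x^8+x^6+x^5+x^4+x^2+1
--     taps = [0, 1, 0, 0, 1, 1, 0, 1, 0, 1]
--     r = [0] * 10
--     for b in bits:
--         if (b ^ r[0]) == 1:
--             r = [r[k + 1] ^ taps[k] for k in range(9)] + [taps[9]]
--         else:
--             r = r[1:] + [0]
--     return bits + r
-- ===== Notes on version B (the rewrite author's own statement) =====
-- stated objective: alternative
-- what changed: Replaces A's full-length polynomial long division over a (len(bits)+10)-cell work array (with an inner 11-step XOR sweep per set bit) by a single streaming pass that keeps only a 10-bit LFSR shift register and never materialises or rescans the padded array.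
import Mathlib
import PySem

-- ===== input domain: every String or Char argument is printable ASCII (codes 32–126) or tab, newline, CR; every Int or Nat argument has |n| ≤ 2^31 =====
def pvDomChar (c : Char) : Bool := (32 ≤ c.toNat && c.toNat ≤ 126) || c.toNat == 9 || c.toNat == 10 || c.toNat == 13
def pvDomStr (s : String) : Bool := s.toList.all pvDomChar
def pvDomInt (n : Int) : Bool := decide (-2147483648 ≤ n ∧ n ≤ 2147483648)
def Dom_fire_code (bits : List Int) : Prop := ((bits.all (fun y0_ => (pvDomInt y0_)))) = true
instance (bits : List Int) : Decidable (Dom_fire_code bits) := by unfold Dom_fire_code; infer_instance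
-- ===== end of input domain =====

-- B replaces A's long division over a padded work array by a streaming 10-bit LFSR (alternative algorithm, same values).

-- ===== PORT A =====
def fire_code (bits : List Int) : List Int :=
  let g : List Int := [1,0,1,0,0,1,1,0,1,0,1]
  let reg := bits ++ List.replicate 10 (0:Int)
  let reg := (PySem.List.pyRange 0 (bits.length : Int) 1).foldl (fun reg i =>
    if PySem.List.pyGetD reg i 0 == 1 then
      (PySem.List.pyRange 0 (g.length : Int) 1).foldl (fun reg j =>
        PySem.List.pySetD reg (i + j)
          (PySem.Int.bxor (PySem.List.pyGetD reg (i + j) 0) (PySem.List.pyGetD g j 0))) reg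
    else reg) reg
  bits ++ PySem.List.slice reg (some (-10)) none

-- ===== PORT B =====
def fire_code_alt (bits : List Int) : List Int :=
  let taps : List Int := [0,1,0,0,1,1,0,1,0,1]
  let r := bits.foldl (fun r b =>
    if PySem.Int.bxor b (PySem.List.pyGetD r 0 0) == 1 then
      ((PySem.List.pyRange 0 9 1).map (fun k =>
        PySem.Int.bxor (PySem.List.pyGetD r (k + 1) 0) (PySem.List.pyGetD taps k 0)))
        ++ [PySem.List.pyGetD taps 9 0]
    else PySem.List.slice r (some 1) none ++ [0]) (List.replicate 10 (0:Int))
  bits ++ r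

-- ===== PRECONDITION & SPEC =====
def Spec_fire_code (bits : List Int) (out : List Int) : Prop := out = fire_code_alt bits
instance (bits : List Int) (out : List Int) : Decidable (Spec_fire_code bits out) := by unfold Spec_fire_code; infer_instance

-- ===== CLAIM (what is proved, stated in full; the proofs are below) =====
def Claim_equal_fire_code : Prop := ∀ (bits : List Int), Dom_fire_code bits → Spec_fire_code bits (fire_code bits)

-- ===== LEMMAS AND PROOFS =====

-- shorthand names for the two generator-polynomial constant lists used by the proofs
def tapsL : List Int := [0,1,0,0,1,1,0,1,0,1]
def gL : List Int := [1,0,1,0,0,1,1,0,1,0,1]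

-- A's outer loop body (definitionally the body inside fire_code)
def astep (reg : List Int) (i : Int) : List Int :=
  if PySem.List.pyGetD reg i 0 == 1 then
    (PySem.List.pyRange 0 (gL.length : Int) 1).foldl (fun reg j =>
      PySem.List.pySetD reg (i + j)
        (PySem.Int.bxor (PySem.List.pyGetD reg (i + j) 0) (PySem.List.pyGetD gL j 0))) reg
  else reg

-- B's loop body (definitionally the body inside fire_code_alt)
def bodyB (r : List Int) (b : Int) : List Int :=
  if PySem.Int.bxor b (PySem.List.pyGetD r 0 0) == 1 then
    ((PySem.List.pyRange 0 9 1).map (fun k =>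
      PySem.Int.bxor (PySem.List.pyGetD r (k + 1) 0) (PySem.List.pyGetD tapsL k 0)))
      ++ [PySem.List.pyGetD tapsL 9 0]
  else PySem.List.slice r (some 1) none ++ [0]

-- clean form of B's loop body (for length-10 registers)
def bstep (r : List Int) (b : Int) : List Int :=
  if PySem.Int.bxor b r.headI == 1 then List.zipWith PySem.Int.bxor (r.tail ++ [0]) tapsL
  else r.tail ++ [0]

-- A's work array after i steps, seen as: processed prefix ++ maskA (remaining bits) (pending flips)
def maskA (bs r : List Int) : List Int :=
  List.zipWith PySem.Int.bxor (bs ++ List.replicate 10 0) (r ++ List.replicate bs.length 0)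

theorem pvCast1 (x : Nat) : (0 ≤ (x:Int)) = True := by simp
theorem pvCast2 (x : Nat) : (0 ≤ -(x:Int) - 1) = False := by simp; omega
theorem pvCast3 (x : Nat) : (-(-(x:Int) - 1) - 1).toNat = x := by omega
theorem pvCast4 (x : Nat) : ((x:Int)).toNat = x := by omega

theorem bxor_assoc' (a b c : Int) :
    PySem.Int.bxor (PySem.Int.bxor a b) c = PySem.Int.bxor a (PySem.Int.bxor b c) := by
  unfold PySem.Int.bxor
  by_cases ha : 0 ≤ a <;> by_cases hb : 0 ≤ b <;> by_cases hc : 0 ≤ c <;>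
    simp only [ha, hb, hc, pvCast1, pvCast2, pvCast3, pvCast4, Nat.xor_assoc, if_true, if_false, ite_true, ite_false, eq_self_iff_true, if_pos, if_neg]

theorem zero_bxor (a : Int) : PySem.Int.bxor 0 a = a := by
  rw [PySem.Int.bxor_comm]; exact PySem.Int.bxor_zero a

theorem zipZeroL : ∀ r : List Int, List.zipWith PySem.Int.bxor (List.replicate r.length 0) r = r := by
  intro r; induction r with
  | nil => rfl
  | cons a r ih => simp [List.replicate_succ, zero_bxor, ih]

theorem zipZeroR : ∀ l : List Int, List.zipWith PySem.Int.bxor l (List.replicate l.length 0) = l := by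
  intro l; induction l with
  | nil => rfl
  | cons a l ih => simp [List.replicate_succ, PySem.Int.bxor_zero, ih]

theorem mask_nil (r : List Int) (h : r.length = 10) : maskA [] r = r := by
  show List.zipWith PySem.Int.bxor ([] ++ List.replicate 10 0) (r ++ List.replicate 0 0) = r
  simp only [List.nil_append, List.replicate_zero, List.append_nil]
  rw [← h]; exact zipZeroL r

theorem mask_cons (b s0 : Int) (bs st : List Int) :
    maskA (b::bs) (s0::st) = PySem.Int.bxor b s0 :: maskA bs (st ++ [0]) := by
  simp [maskA, List.replicate_succ, List.append_assoc]

theorem length_mask (bs r : List Int) (h : r.length = 10) :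
    (maskA bs r).length = bs.length + 10 := by
  simp [maskA, h]; omega

theorem bridge : ∀ (u M : List Int), u.length < M.length →
    List.zipWith PySem.Int.bxor (M.take (u.length+1)) (u++[0]) ++ M.drop (u.length+1)
      = List.zipWith PySem.Int.bxor (M.take u.length) u ++ M.drop u.length := by
  intro u; induction u with
  | nil =>
    intro M h
    cases M with
    | nil => simp at h
    | cons m M' => simp
  | cons u0 u ih =>
    intro M h
    cases M with
    | nil => simp at h
    | cons m M' =>
      simp only [List.length_cons, List.take_succ_cons, List.cons_append,
        List.zipWith_cons_cons, List.drop_succ_cons]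
      rw [ih M' (by simpa using h)]

theorem maskShift : ∀ (bs s t : List Int), s.length = 10 → t.length = 10 →
    List.zipWith PySem.Int.bxor ((maskA bs s).take 10) t ++ (maskA bs s).drop 10
      = maskA bs (List.zipWith PySem.Int.bxor s t) := by
  intro bs; induction bs with
  | nil =>
    intro s t hs ht
    rw [mask_nil s hs, mask_nil _ (by simp [hs, ht])]
    rw [show (10:Nat) = s.length from hs.symm, List.take_length, List.drop_length, List.append_nil]
  | cons b bs ih =>
    intro s t hs ht
    cases s with
    | nil => simp at hs
    | cons s0 st =>
      cases t with
      | nil => simp at ht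
      | cons t0 tt =>
        have hst : st.length = 9 := by simpa using hs
        have htt : tt.length = 9 := by simpa using ht
        rw [mask_cons]
        have hlenM : (maskA bs (st ++ [0])).length = bs.length + 10 :=
          length_mask bs (st ++ [0]) (by simp [hst])
        rw [show (10:Nat) = 9+1 from rfl, List.take_succ_cons, List.drop_succ_cons,
          List.zipWith_cons_cons, List.cons_append]
        rw [List.zipWith_cons_cons, mask_cons]
        congr 1
        · exact bxor_assoc' b s0 t0
        · have hb := bridge tt (maskA bs (st ++ [0])) (by omega)
          rw [htt] at hb
          rw [← hb]
          have := ih (st ++ [0]) (tt ++ [0]) (by simp [hst]) (by simp [htt])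
          rw [show (9+1 : Nat) = 10 from rfl, this,
            List.zipWith_append (by omega)]
          simp [PySem.Int.bxor_zero]

theorem pyGetD_app_len (pre l : List Int) (x : Int) :
    PySem.List.pyGetD (pre ++ x :: l) (pre.length : Int) 0 = x := by
  rw [PySem.List.pyGetD_natCast]
  unfold List.getD
  rw [List.getElem?_append_right (Nat.le_refl _)]
  simp

theorem pyGetD_app_left (l l2 : List Int) (j : Int) (h0 : 0 ≤ j) (h : j < l.length) :
    PySem.List.pyGetD (l ++ l2) j 0 = PySem.List.pyGetD l j 0 := by
  rw [PySem.List.pyGetD_eq_getElem (l ++ l2) 0 h0 (by simp; omega),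
      PySem.List.pyGetD_eq_getElem l 0 h0 (by omega)]
  exact List.getElem_append_left (by omega)

theorem set_app_len : ∀ (pre : List Int) (x v : Int) (l : List Int),
    (pre ++ x :: l).set pre.length v = pre ++ v :: l := by
  intro pre; induction pre with
  | nil => intro x v l; rfl
  | cons p pre ih => intro x v l; simp [ih]

theorem innerXor : ∀ (t pre w rest : List Int), w.length = t.length →
    (PySem.List.pyRange 0 (t.length : Int) 1).foldl
      (fun reg j => PySem.List.pySetD reg ((pre.length : Int) + j)
        (PySem.Int.bxor (PySem.List.pyGetD reg ((pre.length : Int) + j) 0)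
          (PySem.List.pyGetD t j 0)))
      (pre ++ w ++ rest)
    = pre ++ List.zipWith PySem.Int.bxor w t ++ rest := by
  intro t
  induction t using List.reverseRecOn with
  | nil =>
    intro pre w rest h
    rw [List.length_eq_zero_iff.mp h]
    simp [PySem.List.pyRange_one_eq_nil]
  | append_singleton t' c ih =>
    intro pre w rest h
    rcases w.eq_nil_or_concat with rfl | ⟨w', d, rfl⟩
    · simp at h
    simp only [List.concat_eq_append] at h ⊢
    have hw' : w'.length = t'.length := by simp at h; omega
    have hcast : ((t' ++ [c]).length : Int) = (t'.length : Int) + 1 := by simp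
    rw [hcast, PySem.List.pyRange_one_succ_right (by positivity), List.foldl_append]
    have hinner := PySem.List.foldl_congr_mem (PySem.List.pyRange 0 (t'.length : Int) 1)
      (fun reg j => PySem.List.pySetD reg ((pre.length : Int) + j)
        (PySem.Int.bxor (PySem.List.pyGetD reg ((pre.length : Int) + j) 0)
          (PySem.List.pyGetD (t' ++ [c]) j 0)))
      (fun reg j => PySem.List.pySetD reg ((pre.length : Int) + j)
        (PySem.Int.bxor (PySem.List.pyGetD reg ((pre.length : Int) + j) 0)
          (PySem.List.pyGetD t' j 0)))
      (pre ++ w' ++ ([d] ++ rest))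
      (by
        intro acc x hx
        rw [PySem.List.mem_pyRange_one] at hx
        simp only
        rw [pyGetD_app_left t' [c] x hx.1 (by exact_mod_cast hx.2)])
    rw [show pre ++ (w' ++ [d]) ++ rest = pre ++ w' ++ ([d] ++ rest) by simp]
    rw [hinner, ih pre w' ([d] ++ rest) hw']
    simp only [List.foldl_cons, List.foldl_nil]
    have hzw : (List.zipWith PySem.Int.bxor w' t').length = t'.length := by
      simp [List.length_zipWith, hw']
    have hre : pre ++ List.zipWith PySem.Int.bxor w' t' ++ ([d] ++ rest)
        = (pre ++ List.zipWith PySem.Int.bxor w' t') ++ d :: rest := by simp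
    have hidx : ((pre.length : Int) + (t'.length : Int))
        = (((pre ++ List.zipWith PySem.Int.bxor w' t').length : Nat) : Int) := by
      simp [hzw]
    rw [hre, hidx, pyGetD_app_len]
    rw [show PySem.List.pyGetD (t' ++ [c]) ((t'.length : Nat) : Int) 0 = c from pyGetD_app_len t' [] c]
    rw [PySem.List.pySetD_natCast, set_app_len]
    rw [List.zipWith_append (by omega)]
    simp

theorem length_bstep (r : List Int) (b : Int) (h : r.length = 10) :
    (bstep r b).length = 10 := by
  unfold bstep
  have : r.tail.length = 9 := by simp [h]
  split <;> simp [List.length_zipWith, this, tapsL]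

theorem loop_inv : ∀ (bs pre r : List Int), r.length = 10 →
    ∃ pre', pre'.length = pre.length + bs.length ∧
      (PySem.List.pyRange (pre.length : Int) (((pre.length + bs.length : Nat)) : Int) 1).foldl
        astep (pre ++ maskA bs r)
      = pre' ++ bs.foldl bstep r := by
  intro bs
  induction bs with
  | nil =>
    intro pre r hr
    refine ⟨pre, by simp, ?_⟩
    rw [PySem.List.pyRange_one_eq_nil (by simp)]
    simp [mask_nil r hr]
  | cons b bs ih =>
    intro pre r hr
    cases r with
    | nil => simp at hr
    | cons r0 rt =>
      have hrt : rt.length = 9 := by simpa using hr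
      rw [mask_cons]
      rw [PySem.List.pyRange_one_cons (by push_cast [List.length_cons]; omega)]
      rw [List.foldl_cons]
      set x := PySem.Int.bxor b r0 with hxdef
      set M := maskA bs (rt ++ [0]) with hMdef
      have hMlen : M.length = bs.length + 10 := length_mask bs (rt ++ [0]) (by simp [hrt])
      have hstep : astep (pre ++ x :: M) ((pre.length : Nat) : Int)
          = if x == 1 then (pre ++ [PySem.Int.bxor x 1])
              ++ maskA bs (List.zipWith PySem.Int.bxor (rt ++ [0]) tapsL)
            else (pre ++ [x]) ++ M := by
        unfold astep
        rw [pyGetD_app_len]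
        by_cases hx : x == 1
        · rw [if_pos hx, if_pos hx]
          have hsplit : pre ++ x :: M = pre ++ (x :: M.take 10) ++ M.drop 10 := by
            simp [List.take_append_drop]
          have hwlen : (x :: M.take 10).length = gL.length := by
            simp [List.length_take, hMlen, gL]
          rw [hsplit, innerXor gL pre (x :: M.take 10) (M.drop 10) hwlen]
          rw [show gL = (1:Int) :: tapsL from rfl, List.zipWith_cons_cons]
          have hms := maskShift bs (rt ++ [0]) tapsL (by simp [hrt]) rfl
          rw [← hMdef] at hms
          rw [show (pre ++ PySem.Int.bxor x 1 :: List.zipWith PySem.Int.bxor (M.take 10) tapsL) ++ M.drop 10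
              = pre ++ [PySem.Int.bxor x 1] ++ (List.zipWith PySem.Int.bxor (M.take 10) tapsL ++ M.drop 10) from by simp]
          rw [hms]
        · rw [if_neg hx, if_neg hx]; simp
      rw [hstep]
      have hbstep : bstep (r0 :: rt) b
          = if x == 1 then List.zipWith PySem.Int.bxor (rt ++ [0]) tapsL else rt ++ [0] := by
        unfold bstep
        simp only [List.headI_cons, List.tail_cons, ← hxdef]
      by_cases hx : x == 1
      · rw [if_pos hx] at hstep ⊢
        have hr' : (List.zipWith PySem.Int.bxor (rt ++ [0]) tapsL).length = 10 := by
          simp [List.length_zipWith, hrt, tapsL]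
        obtain ⟨pre', hl, he⟩ := ih (pre ++ [PySem.Int.bxor x 1])
          (List.zipWith PySem.Int.bxor (rt ++ [0]) tapsL) hr'
        refine ⟨pre', by simp at hl ⊢; omega, ?_⟩
        have hb1 : ((pre.length : Nat) : Int) + 1 = (((pre ++ [PySem.Int.bxor x 1]).length : Nat) : Int) := by
          simp
        have hb2 : (((pre.length + (b :: bs).length : Nat)) : Int)
            = ((((pre ++ [PySem.Int.bxor x 1]).length + bs.length : Nat)) : Int) := by
          simp; omega
        rw [hb1, hb2, he, List.foldl_cons, hbstep, if_pos hx]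
      · rw [if_neg hx] at hstep ⊢
        obtain ⟨pre', hl, he⟩ := ih (pre ++ [x]) (rt ++ [0]) (by simp [hrt])
        refine ⟨pre', by simp at hl ⊢; omega, ?_⟩
        have hb1 : ((pre.length : Nat) : Int) + 1 = (((pre ++ [x]).length : Nat) : Int) := by simp
        have hb2 : (((pre.length + (b :: bs).length : Nat)) : Int)
            = ((((pre ++ [x]).length + bs.length : Nat)) : Int) := by simp; omega
        rw [hb1, hb2, he, List.foldl_cons, hbstep, if_neg hx]

theorem mask_init (bs : List Int) :
    maskA bs (List.replicate 10 0) = bs ++ List.replicate 10 0 := by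
  unfold maskA
  rw [← List.replicate_add]
  rw [show (10 + bs.length) = (bs ++ List.replicate 10 (0:Int)).length from by simp; omega]
  exact zipZeroR _

theorem bodyB_eq_bstep (r : List Int) (b : Int) (h : r.length = 10) :
    bodyB r b = bstep r b := by
  match r, h with
  | [a0,a1,a2,a3,a4,a5,a6,a7,a8,a9], _ => rfl

theorem foldl_bodyB_eq : ∀ (bs r : List Int), r.length = 10 →
    bs.foldl bodyB r = bs.foldl bstep r := by
  intro bs
  induction bs with
  | nil => intro r h; rfl
  | cons b bs ih =>
    intro r h
    rw [List.foldl_cons, List.foldl_cons, bodyB_eq_bstep r b h, ih _ (length_bstep r b h)]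

theorem foldl_bstep_length : ∀ (bs r : List Int), r.length = 10 →
    (bs.foldl bstep r).length = 10 := by
  intro bs
  induction bs with
  | nil => intro r h; exact h
  | cons b bs ih => intro r h; exact ih _ (length_bstep r b h)

-- ===== VERDICT (by name: the statement is the Claim_ definition above) =====
theorem fire_code_spec : Claim_equal_fire_code := by
  intro bits _
  unfold Spec_fire_code
  have hA : fire_code bits = bits ++ PySem.List.slice
      ((PySem.List.pyRange 0 (bits.length : Int) 1).foldl astep
        (bits ++ List.replicate 10 0)) (some (-10)) none := rfl
  have hB : fire_code_alt bits = bits ++ bits.foldl bodyB (List.replicate 10 0) := rfl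
  obtain ⟨pre', hl, he⟩ := loop_inv bits [] (List.replicate 10 0) rfl
  rw [mask_init] at he
  simp only [List.nil_append, List.length_nil, Nat.cast_zero, Nat.zero_add] at he hl
  rw [hA, hB]
  have hF : (bits.foldl bstep (List.replicate 10 0)).length = 10 :=
    foldl_bstep_length bits _ rfl
  rw [he]
  rw [PySem.List.slice_from_neg_ofNat _ 10 (by norm_num)]
  rw [show (pre' ++ bits.foldl bstep (List.replicate 10 0)).length - 10 = pre'.length from by
    rw [List.length_append, hF]; omega]
  rw [List.drop_left]
  rw [foldl_bodyB_eq bits _ rfl]
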